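-- pv_equiv track=rewrite | github.com/AndreiTolstikov/avtMonExp | avtMonExp/tw_search_experts.py | calculating_tw_user_field_score
-- ===== SOURCE A (Python) =====
-- def calculating_tw_user_field_score (tw_user_field_value, interval_scale_value_list):
--
--     """
--     Calculates the score for the specified Twitter User field value
--
--     Arguments:
--         tw_user_field_value {int} -- Twitter User field value
--         interval_scale_value_list {list} -- Interval scale values
--
--     Returns:
--         [int] -- Score for the specified Twitter User field value
--     """
--
--     interval_scale_first_value = interval_scale_value_list[0]
--     interval_scale_last_value = interval_scale_value_list[len(interval_scale_value_list)-1]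
--
--     if tw_user_field_value < interval_scale_first_value:
--         tw_user_field_score = 0
--     elif tw_user_field_value >= interval_scale_last_value:
--         tw_user_field_score = len(interval_scale_value_list)
--     else:
--         for i in range(len(interval_scale_value_list)-1):
--             if (tw_user_field_value >= interval_scale_value_list[i]) and \
--                     (tw_user_field_value < interval_scale_value_list[i+1]):
--                 tw_user_field_score = i+1
--                 break
--
--     return tw_user_field_score
-- ===== SOURCE B (Python) =====
-- def calculating_tw_user_field_score(tw_user_field_value, interval_scale_value_list):
--     """Score = number of interval-scale values <= the field value, found by
--     binary search on the sorted interval scale (O(log n))."""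
--     lo, hi = 0, len(interval_scale_value_list)
--     while lo < hi:
--         mid = (lo + hi) // 2
--         if interval_scale_value_list[mid] <= tw_user_field_value:
--             lo = mid + 1
--         else:
--             hi = mid
--     return lo
-- ===== Notes on version B (the rewrite author's own statement) =====
-- stated objective: faster
-- what changed: Replaces A's endpoint checks plus linear adjacent-pair bracket scan with a single hand-written binary search for the insertion point; Pre_ excludes the empty list (A raises IndexError) and unsorted interval lists whose value lies strictly inside the list's range, outside the function's natural domain of a sorted interval scale, where A's first-bracket scan gives accidental results (or raises UnboundLocalError).
-- outside the precondition, e.g. on calculating_tw_user_field_score(2, [3, 1, 4]): A returns 0, B returns 2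
import Mathlib
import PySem

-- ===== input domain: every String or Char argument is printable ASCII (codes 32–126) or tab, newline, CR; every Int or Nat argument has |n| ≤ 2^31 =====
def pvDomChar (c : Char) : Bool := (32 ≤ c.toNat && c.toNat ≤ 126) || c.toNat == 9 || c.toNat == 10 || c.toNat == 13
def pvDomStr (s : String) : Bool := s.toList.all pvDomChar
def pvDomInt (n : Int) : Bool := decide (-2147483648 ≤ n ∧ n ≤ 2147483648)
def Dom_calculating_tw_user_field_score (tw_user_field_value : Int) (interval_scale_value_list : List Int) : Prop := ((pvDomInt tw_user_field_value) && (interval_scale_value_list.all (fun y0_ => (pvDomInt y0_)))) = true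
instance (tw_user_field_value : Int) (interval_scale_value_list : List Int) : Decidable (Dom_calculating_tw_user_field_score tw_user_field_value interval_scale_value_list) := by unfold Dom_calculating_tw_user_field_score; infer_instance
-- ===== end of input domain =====

-- B replaces A's endpoint checks plus linear adjacent-pair bracket scan with a
-- binary search for the insertion point in the sorted interval scale (asymptotically faster).


-- ===== PORT A =====
-- the 'for i in range(len(lst)-1): if lst[i] <= v < lst[i+1]: score = i+1; break' loop,
-- totalized with a fuel argument (fuel = len suffices to run range(len-1) to the end);
-- returns 0 where Python would raise UnboundLocalError (no bracket found) — unreachable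
-- inside Pre_ (sorted scale) whenever this loop is reached.
def pvALoop (v : Int) (l : List Int) (i : Nat) : Nat → Int
  | 0 => 0
  | fuel + 1 =>
    if i + 1 < l.length then
      if l.getD i 0 ≤ v ∧ v < l.getD (i + 1) 0 then (i : Int) + 1
      else pvALoop v l (i + 1) fuel
    else 0

def calculating_tw_user_field_score (tw_user_field_value : Int) (interval_scale_value_list : List Int) : Int :=
  match PySem.List.pyGet? interval_scale_value_list 0,
        PySem.List.pyGet? interval_scale_value_list ((interval_scale_value_list.length : Int) - 1) with
  | some first, some last =>
      if tw_user_field_value < first then 0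
      else if tw_user_field_value ≥ last then (interval_scale_value_list.length : Int)
      else pvALoop tw_user_field_value interval_scale_value_list 0 interval_scale_value_list.length
  | _, _ => 0  -- IndexError on the empty list: excluded by Pre_

-- ===== PORT B =====
-- the 'while lo < hi: mid = (lo+hi)//2; …' binary-search loop of Source B, step for step;
-- '(lo+hi)//2' on the nonnegative Nat indices is exactly Python's floor division
-- totalized with a fuel argument (fuel = len suffices: hi - lo shrinks each iteration)
def pvBisect (v : Int) (l : List Int) (lo hi : Nat) : Nat → Nat
  | 0 => lo
  | fuel + 1 =>
    if lo < hi then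
      if l.getD ((lo + hi) / 2) 0 ≤ v then pvBisect v l ((lo + hi) / 2 + 1) hi fuel
      else pvBisect v l lo ((lo + hi) / 2) fuel
    else lo

def calculating_tw_user_field_score_alt (tw_user_field_value : Int) (interval_scale_value_list : List Int) : Int :=
  (pvBisect tw_user_field_value interval_scale_value_list 0 interval_scale_value_list.length interval_scale_value_list.length : Int)

-- ===== PRECONDITION & SPEC =====
-- Pre_ excludes the empty list, on which A raises IndexError, and unsorted lists with the
-- value strictly inside the list's range, where A's endpoint shortcuts and first-bracket scan
-- give accidental results (or raise UnboundLocalError) outside the function's natural domain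
-- of a sorted interval scale; unsorted lists with the value below or above every element stay inside.
def Pre_calculating_tw_user_field_score (tw_user_field_value : Int) (interval_scale_value_list : List Int) : Prop :=
  interval_scale_value_list ≠ [] ∧
    (List.Pairwise (· ≤ ·) interval_scale_value_list ∨
     (∀ x ∈ interval_scale_value_list, tw_user_field_value < x) ∨
     (∀ x ∈ interval_scale_value_list, x ≤ tw_user_field_value))
instance (tw_user_field_value : Int) (interval_scale_value_list : List Int) : Decidable (Pre_calculating_tw_user_field_score tw_user_field_value interval_scale_value_list) := by unfold Pre_calculating_tw_user_field_score; infer_instance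

def pvWitness_calculating_tw_user_field_score : Int × List Int := (5, [0, 3, 10, 20])

def Spec_calculating_tw_user_field_score (tw_user_field_value : Int) (interval_scale_value_list : List Int) (out : Int) : Prop := out = calculating_tw_user_field_score_alt tw_user_field_value interval_scale_value_list
instance (tw_user_field_value : Int) (interval_scale_value_list : List Int) (out : Int) : Decidable (Spec_calculating_tw_user_field_score tw_user_field_value interval_scale_value_list out) := by unfold Spec_calculating_tw_user_field_score; infer_instance

-- ===== CLAIM =====
def Claim_equal_calculating_tw_user_field_score : Prop := ∀ (tw_user_field_value : Int) (interval_scale_value_list : List Int), Dom_calculating_tw_user_field_score tw_user_field_value interval_scale_value_list → Pre_calculating_tw_user_field_score tw_user_field_value interval_scale_value_list → Spec_calculating_tw_user_field_score tw_user_field_value interval_scale_value_list (calculating_tw_user_field_score tw_user_field_value interval_scale_value_list)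

-- ===== LEMMAS AND PROOFS =====

-- r is the bisect_right boundary: everything before r is ≤ v, everything from r on is > v
def pvBdry (v : Int) (l : List Int) (r : Nat) : Prop :=
  r ≤ l.length ∧ (∀ j < r, l.getD j 0 ≤ v) ∧ (∀ j, r ≤ j → j < l.length → v < l.getD j 0)

theorem pvBdry_unique {v : Int} {l : List Int} {r₁ r₂ : Nat}
    (h₁ : pvBdry v l r₁) (h₂ : pvBdry v l r₂) : r₁ = r₂ := by
  obtain ⟨hl₁, ha₁, hb₁⟩ := h₁
  obtain ⟨hl₂, ha₂, hb₂⟩ := h₂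
  rcases Nat.lt_trichotomy r₁ r₂ with h | h | h
  · exact absurd (ha₂ r₁ h) (not_le.2 (hb₁ r₁ (le_refl _) (by omega)))
  · exact h
  · exact absurd (ha₁ r₂ h) (not_le.2 (hb₂ r₂ (le_refl _) (by omega)))

-- monotonicity of getD from the Pairwise hypothesis
theorem pvSorted_getD {l : List Int} (hp : List.Pairwise (· ≤ ·) l)
    {i j : Nat} (hij : i ≤ j) (hj : j < l.length) : l.getD i 0 ≤ l.getD j 0 := by
  rcases Nat.eq_or_lt_of_le hij with h | h
  · subst h; exact le_refl _
  · have := (List.pairwise_iff_getElem (R := (· ≤ ·)) (l := l)).1 hp i j (by omega) hj h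
    simpa [List.getD_eq_getElem?_getD, List.getElem?_eq_getElem, hj, Nat.lt_of_lt_of_le h (le_of_lt hj)] using this

-- the binary search maintains the boundary invariant and ends at the boundary
theorem pvBisect_bdry {v : Int} {l : List Int} (hp : List.Pairwise (· ≤ ·) l) :
    ∀ (fuel lo hi : Nat), hi - lo ≤ fuel → lo ≤ hi → hi ≤ l.length →
    (∀ j < lo, l.getD j 0 ≤ v) → (∀ j, hi ≤ j → j < l.length → v < l.getD j 0) →
    pvBdry v l (pvBisect v l lo hi fuel) := by
  intro fuel
  induction fuel with
  | zero =>
    intro lo hi hd hlo hhi ha hb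
    unfold pvBisect
    exact ⟨by omega, ha, fun j hj hjl => hb j (by omega) hjl⟩
  | succ fuel ih =>
    intro lo hi hd hlo hhi ha hb
    by_cases he : lo < hi
    · have hmid₁ : lo ≤ (lo + hi) / 2 := by omega
      have hmid₂ : (lo + hi) / 2 < hi := by omega
      unfold pvBisect; rw [if_pos he]
      by_cases hc : l.getD ((lo + hi) / 2) 0 ≤ v
      · rw [if_pos hc]
        refine ih ((lo + hi) / 2 + 1) hi (by omega) (by omega) hhi ?_ hb
        intro j hj
        exact le_trans (pvSorted_getD hp (by omega) (by omega)) hc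
      · rw [if_neg hc]
        refine ih lo ((lo + hi) / 2) (by omega) (by omega) (by omega) ha ?_
        intro j hj hjl
        exact lt_of_lt_of_le (lt_of_not_ge hc) (pvSorted_getD hp hj hjl)
    · unfold pvBisect; rw [if_neg he]
      exact ⟨by omega, ha, fun j hj hjl => hb j (by omega) hjl⟩

-- A's middle loop finds the first bracket lst[i] ≤ v < lst[i+1]; given every value up to
-- position i is ≤ v and the last value exceeds v, the result i+1 is the boundary
theorem pvALoop_bdry {v : Int} {l : List Int} (hp : List.Pairwise (· ≤ ·) l)
    (hlast : v < l.getD (l.length - 1) 0) :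
    ∀ (fuel i : Nat), l.length - i ≤ fuel → i + 1 ≤ l.length →
    (∀ j ≤ i, l.getD j 0 ≤ v) →
    ∃ k : Nat, pvALoop v l i fuel = (k : Int) ∧ pvBdry v l k := by
  intro fuel
  induction fuel with
  | zero => intro i hf hi hinv; omega
  | succ fuel ih =>
    intro i hf hi hinv
    have hi1 : i + 1 < l.length := by
      rcases Nat.lt_or_ge (i + 1) l.length with h | h
      · exact h
      · have : i = l.length - 1 := by omega
        subst this
        exact absurd (hinv _ (le_refl _)) (not_le.2 hlast)
    unfold pvALoop
    rw [if_pos hi1]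
    by_cases hc : l.getD i 0 ≤ v ∧ v < l.getD (i + 1) 0
    · rw [if_pos hc]
      refine ⟨i + 1, by push_cast; ring, by omega, fun j hj => hinv j (by omega), ?_⟩
      intro j hj hjl
      exact lt_of_lt_of_le hc.2 (pvSorted_getD hp hj hjl)
    · rw [if_neg hc]
      have hnext : l.getD (i + 1) 0 ≤ v := by
        rcases not_and_or.1 hc with h | h
        · exact absurd (hinv i (le_refl _)) h
        · exact le_of_not_gt fun hg => h hg
      refine ih (i + 1) (by omega) (by omega) ?_
      intro j hj
      rcases Nat.lt_or_ge j (i + 1) with h' | h'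
      · exact hinv j (by omega)
      · have : j = i + 1 := by omega
        subst this; exact hnext

-- off the sorted domain: if every element exceeds v the search never moves lo and ends at lo
theorem pvBisect_all_gt {v : Int} {l : List Int}
    (hgt : ∀ j, j < l.length → v < l.getD j 0) :
    ∀ (fuel lo hi : Nat), hi ≤ l.length → pvBisect v l lo hi fuel = lo := by
  intro fuel
  induction fuel with
  | zero => intro lo hi _; unfold pvBisect; rfl
  | succ fuel ih =>
    intro lo hi hhi
    unfold pvBisect
    by_cases he : lo < hi
    · rw [if_pos he, if_neg (not_le.2 (hgt _ (by omega)))]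
      exact ih lo _ (by omega)
    · rw [if_neg he]

-- if every element is ≤ v the search always moves lo and ends at hi
theorem pvBisect_all_le {v : Int} {l : List Int}
    (hle : ∀ j, j < l.length → l.getD j 0 ≤ v) :
    ∀ (fuel lo hi : Nat), hi - lo ≤ fuel → lo ≤ hi → hi ≤ l.length →
    pvBisect v l lo hi fuel = hi := by
  intro fuel
  induction fuel with
  | zero =>
    intro lo hi hd hlo _
    unfold pvBisect
    omega
  | succ fuel ih =>
    intro lo hi hd hlo hhi
    unfold pvBisect
    by_cases he : lo < hi
    · rw [if_pos he, if_pos (hle _ (by omega))]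
      exact ih _ _ (by omega) (by omega) hhi
    · rw [if_neg he]; omega

-- ===== VERDICT =====
theorem calculating_tw_user_field_score_spec : Claim_equal_calculating_tw_user_field_score := by
  intro v l _ hpre
  obtain ⟨hne, hcase⟩ := hpre
  have hlen : 0 < l.length := List.length_pos_iff.2 hne
  have hlast' : l.length - 1 < l.length := by omega
  have h0 : PySem.List.pyGet? l 0 = some (l.getD 0 0) := by
    rw [PySem.List.pyGet?_zero]
    simp [List.getD_eq_getElem?_getD, List.getElem?_eq_getElem hlen]
  have hl : PySem.List.pyGet? l ((l.length : Int) - 1) = some (l.getD (l.length - 1) 0) := by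
    have h1 : ((l.length : Int) - 1) = ((l.length - 1 : Nat) : Int) := by omega
    rw [h1, PySem.List.pyGet?_natCast]
    simp [List.getD_eq_getElem?_getD, List.getElem?_eq_getElem hlast']
  unfold Spec_calculating_tw_user_field_score
  unfold calculating_tw_user_field_score calculating_tw_user_field_score_alt
  rw [h0, hl]
  dsimp only
  rcases hcase with hp | hgt | hle
  · -- sorted scale: both sides compute the bisect_right boundary
    have hB : pvBdry v l (pvBisect v l 0 l.length l.length) :=
      pvBisect_bdry hp l.length 0 l.length (by omega) (by omega) (le_refl _)
        (by omega) (by omega)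
    split_ifs with h1 h2
    · -- v < first: the boundary is 0
      have hz : pvBdry v l 0 :=
        ⟨by omega, by omega, fun j _ hjl => lt_of_lt_of_le h1 (pvSorted_getD hp (by omega) hjl)⟩
      have := pvBdry_unique hz hB
      omega
    · -- v ≥ last: the boundary is len
      have hn : pvBdry v l l.length :=
        ⟨le_refl _, fun j hj => le_trans (pvSorted_getD hp (by omega) hlast') h2, by omega⟩
      have := pvBdry_unique hn hB
      omega
    · -- middle: A's loop reaches the same boundary
      have hlast : v < l.getD (l.length - 1) 0 := lt_of_not_ge h2
      obtain ⟨k, hk, hbk⟩ :=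
        pvALoop_bdry hp hlast l.length 0 (by omega) (by omega)
          (fun j hj => by
            have : j = 0 := by omega
            subst this; exact le_of_not_gt h1)
      rw [hk]
      have := pvBdry_unique hbk hB
      omega
  · -- v below every element: A takes its first branch, B's search never moves lo
    have hgt' : ∀ j, j < l.length → v < l.getD j 0 := by
      intro j hj
      have := hgt l[j] (l.getElem_mem hj)
      simpa [List.getD_eq_getElem?_getD, List.getElem?_eq_getElem hj] using this
    rw [if_pos (hgt' 0 hlen), pvBisect_all_gt hgt' l.length 0 l.length (le_refl _)]
    rfl
  · -- v at or above every element: A takes its second branch, B's search always moves lo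
    have hle' : ∀ j, j < l.length → l.getD j 0 ≤ v := by
      intro j hj
      have := hle l[j] (l.getElem_mem hj)
      simpa [List.getD_eq_getElem?_getD, List.getElem?_eq_getElem hj] using this
    rw [if_neg (not_lt.2 (hle' 0 hlen)),
        if_pos (hle' (l.length - 1) hlast'),
        pvBisect_all_le hle' l.length 0 l.length (by omega) (by omega) (le_refl _)]
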